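-- pv_equiv track=rewrite | github.com/subhiashraf912/PivotalGamesUnpacker | undat.py | ce_hash
-- ===== SOURCE A (Python) =====
-- def ce_hash(input_string: str) -> int:
--     dwHash = 1
--     j = 0
--     bCounter = 1
--     dwBlocks = 8 * len(input_string)
--     encoded = input_string.encode('ascii', errors='ignore')
--     for i in range(dwBlocks):
--         D = (dwHash & 0x80000000) != 0
--         A = (dwHash & 0x200000) != 0
--         B = (dwHash & 2) != 0
--         C = (dwHash & 1) != 0
--         dwHash = (dwHash << 1) & 0xFFFFFFFF
--         current_char = encoded[j] if j < len(encoded) else 0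
--         X = ((current_char & bCounter) != 0)
--         if D ^ (A ^ B ^ C ^ X):
--             dwHash |= 1
--         bCounter <<= 1
--         if bCounter == 0 or bCounter > 0x80:
--             j += 1
--             bCounter = 1
--     return dwHash & 0xFFFFFFFF
-- ===== SOURCE B (Python) =====
-- _MASK = 0xFFFFFFFF
--
-- def _lfsr_feed(state, byte):
--     # 8 LFSR steps (taps 31,21,1,0), input bits LSB first
--     for k in range(8):
--         fb = ((state >> 31) ^ (state >> 21) ^ (state >> 1) ^ state ^ (byte >> k)) & 1
--         state = ((state << 1) & _MASK) | fb
--     return state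
--
-- # T[b]: state after feeding byte b into state 0
-- _T = [_lfsr_feed(0, b) for b in range(256)]
-- # S0..S3: the linear no-input 8-step transform L8, split by state byte
-- _S0 = [_lfsr_feed(b, 0) for b in range(256)]
-- _S1 = [_lfsr_feed(b << 8, 0) for b in range(256)]
-- _S2 = [_lfsr_feed(b << 16, 0) for b in range(256)]
-- _S3 = [_lfsr_feed(b << 24, 0) for b in range(256)]
--
-- def ce_hash(input_string: str) -> int:
--     encoded = input_string.encode('ascii', errors='ignore')
--     n = len(encoded)
--     h = 1
--     for j in range(len(input_string)):
--         byte = encoded[j] if j < n else 0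
--         h = (_S3[(h >> 24) & 0xFF] ^ _S2[(h >> 16) & 0xFF]
--              ^ _S1[(h >> 8) & 0xFF] ^ _S0[h & 0xFF] ^ _T[byte])
--     return h & _MASK
-- ===== Notes on version B (the rewrite author's own statement) =====
-- stated objective: faster
-- what changed: Replaces the flat 8*len(input) bit-by-bit LFSR loop (with j/bCounter bookkeeping) by one table-driven step per character: four precomputed 256-entry tables apply the no-input 8-step transform to the state bytes and a fifth table injects the input byte, exploiting GF(2) linearity of the feedback.
import Mathlib
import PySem

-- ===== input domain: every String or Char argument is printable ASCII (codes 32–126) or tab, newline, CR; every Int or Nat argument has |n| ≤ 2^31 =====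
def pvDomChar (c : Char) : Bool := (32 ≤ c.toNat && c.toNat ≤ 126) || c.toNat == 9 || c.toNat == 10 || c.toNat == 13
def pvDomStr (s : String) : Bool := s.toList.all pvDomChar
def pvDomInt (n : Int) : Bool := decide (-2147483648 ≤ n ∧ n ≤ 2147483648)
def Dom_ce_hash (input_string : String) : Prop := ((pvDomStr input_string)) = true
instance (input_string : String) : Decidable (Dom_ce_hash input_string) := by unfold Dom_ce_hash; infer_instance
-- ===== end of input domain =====

-- B replaces the flat 8*len-bit LFSR loop by one table-driven step per character
-- (precomputed 256-entry tables, GF(2)-linear decomposition); measurably faster, same return value.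

-- ===== PORT A =====
-- str.encode('ascii', errors='ignore'): bytes of the characters with code < 128 (exact for this call)
def pvEncodeAscii (s : String) : List Int :=
  (s.toList.filter (fun c => c.toNat < 128)).map (fun c => (c.toNat : Int))

def ce_hash (input_string : String) : Int :=
  let dwBlocks : Int := 8 * PySem.Str.len input_string
  let encoded : List Int := pvEncodeAscii input_string
  let st :=
    (PySem.List.pyRange 0 dwBlocks 1).foldl
      (fun (st : Int × Int × Int) (_i : Int) =>
        let dwHash := st.1
        let j := st.2.1
        let bCounter := st.2.2
        let D : Bool := PySem.Int.band dwHash 0x80000000 != 0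
        let A : Bool := PySem.Int.band dwHash 0x200000 != 0
        let B : Bool := PySem.Int.band dwHash 2 != 0
        let C : Bool := PySem.Int.band dwHash 1 != 0
        let dwHash := PySem.Int.band (dwHash <<< (1 : Nat)) 0xFFFFFFFF
        let current_char : Int :=
          if j < (encoded.length : Int) then PySem.List.pyGetD encoded j 0 else 0
        let X : Bool := PySem.Int.band current_char bCounter != 0
        let dwHash := if Bool.xor D (Bool.xor A (Bool.xor B (Bool.xor C X))) then PySem.Int.bor dwHash 1 else dwHash
        let bCounter := bCounter <<< (1 : Nat)
        if bCounter = 0 ∨ bCounter > 0x80 then (dwHash, j + 1, (1 : Int)) else (dwHash, j, bCounter))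
      (1, 0, 1)
  PySem.Int.band st.1 0xFFFFFFFF

-- ===== PORT B =====
-- 8 LFSR steps (taps 31,21,1,0), input bits LSB first  (k ranges over [0,8), so k.toNat is exact)
def pvLfsrFeed (state : Int) (byte : Int) : Int :=
  (PySem.List.pyRange 0 8 1).foldl
    (fun state k =>
      let fb := PySem.Int.band
        (PySem.Int.bxor (PySem.Int.bxor (PySem.Int.bxor (PySem.Int.bxor
          (state >>> (31 : Nat)) (state >>> (21 : Nat))) (state >>> (1 : Nat))) state)
          (byte >>> k.toNat)) 1
      PySem.Int.bor (PySem.Int.band (state <<< (1 : Nat)) 0xFFFFFFFF) fb)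
    state

-- T[b]: state after feeding byte b into state 0;  S0..S3: the no-input transform split by state byte
def pvT : List Int := (PySem.List.pyRange 0 256 1).map (fun b => pvLfsrFeed 0 b)
def pvS0 : List Int := (PySem.List.pyRange 0 256 1).map (fun b => pvLfsrFeed b 0)
def pvS1 : List Int := (PySem.List.pyRange 0 256 1).map (fun (b : Int) => pvLfsrFeed (b <<< (8 : Nat)) 0)
def pvS2 : List Int := (PySem.List.pyRange 0 256 1).map (fun (b : Int) => pvLfsrFeed (b <<< (16 : Nat)) 0)
def pvS3 : List Int := (PySem.List.pyRange 0 256 1).map (fun (b : Int) => pvLfsrFeed (b <<< (24 : Nat)) 0)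

def ce_hash_alt (input_string : String) : Int :=
  let encoded : List Int := pvEncodeAscii input_string
  let n : Int := encoded.length
  let h :=
    (PySem.List.pyRange 0 (PySem.Str.len input_string) 1).foldl
      (fun (h : Int) (j : Int) =>
        let byte : Int := if j < n then PySem.List.pyGetD encoded j 0 else 0
        PySem.Int.bxor (PySem.Int.bxor (PySem.Int.bxor (PySem.Int.bxor
          (PySem.List.pyGetD pvS3 (PySem.Int.band (h >>> (24 : Nat)) 0xFF) 0)
          (PySem.List.pyGetD pvS2 (PySem.Int.band (h >>> (16 : Nat)) 0xFF) 0))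
          (PySem.List.pyGetD pvS1 (PySem.Int.band (h >>> (8 : Nat)) 0xFF) 0))
          (PySem.List.pyGetD pvS0 (PySem.Int.band h 0xFF) 0))
          (PySem.List.pyGetD pvT byte 0))
      1
  PySem.Int.band h 0xFFFFFFFF

-- ===== PRECONDITION & SPEC =====
def Spec_ce_hash (input_string : String) (out : Int) : Prop := out = ce_hash_alt input_string
instance (input_string : String) (out : Int) : Decidable (Spec_ce_hash input_string out) := by unfold Spec_ce_hash; infer_instance

-- ===== CLAIM (what is proved, stated in full; the proofs are below) =====
def Claim_equal_ce_hash : Prop := ∀ (input_string : String), Dom_ce_hash input_string → Spec_ce_hash input_string (ce_hash input_string)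

-- ===== LEMMAS AND PROOFS =====

-- Nat-level model: one LFSR step in xor normal form
def pvPar (c k s : Nat) : Bool :=
  Bool.xor (s.testBit 31) (Bool.xor (s.testBit 21) (Bool.xor (s.testBit 1) (Bool.xor (s.testBit 0) (c.testBit k))))

def pvMstep (c k s : Nat) : Nat := ((s <<< 1) &&& 0xFFFFFFFF) ^^^ (pvPar c k s).toNat

def pvFeedN (c s : Nat) : Nat :=
  pvMstep c 7 (pvMstep c 6 (pvMstep c 5 (pvMstep c 4 (pvMstep c 3 (pvMstep c 2 (pvMstep c 1 (pvMstep c 0 s)))))))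

-- A's step on the hash, at Nat level, with the bit-mask bc = 2^k
def pvAstep (c bc h : Nat) : Nat :=
  let base := (h <<< 1) &&& 0xFFFFFFFF
  if Bool.xor ((h &&& 0x80000000) != 0) (Bool.xor ((h &&& 0x200000) != 0)
      (Bool.xor ((h &&& 2) != 0) (Bool.xor ((h &&& 1) != 0) ((c &&& bc) != 0)))) then
    base ||| 1
  else base

def pvByteA (c h : Nat) : Nat :=
  pvAstep c 128 (pvAstep c 64 (pvAstep c 32 (pvAstep c 16 (pvAstep c 8 (pvAstep c 4 (pvAstep c 2 (pvAstep c 1 h)))))))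

def pvCN (e : List Nat) (j : Nat) : Nat := if j < e.length then e.getD j 0 else 0

-- A's full loop state step at Nat level
def pvStepT (e : List Nat) (st : Nat × Nat × Nat) : Nat × Nat × Nat :=
  let h := st.1
  let j := st.2.1
  let bc := st.2.2
  let h' := pvAstep (pvCN e j) bc h
  let bc' := bc <<< 1
  if bc' = 0 ∨ bc' > 0x80 then (h', j + 1, 1) else (h', j, bc')

-- B's step at Nat level (left-associated xors, as in the port)
def pvBStepN (e : List Nat) (h j : Nat) : Nat :=
  (((pvFeedN 0 ((((h >>> 24) &&& 0xFF)) <<< 24) ^^^ pvFeedN 0 ((((h >>> 16) &&& 0xFF)) <<< 16)) ^^^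
      pvFeedN 0 ((((h >>> 8) &&& 0xFF)) <<< 8)) ^^^ pvFeedN 0 (h &&& 0xFF)) ^^^ pvFeedN (pvCN e j) 0

def pvRep {α : Type} (g : α → α) : Nat → α → α
  | 0, s => s
  | n + 1, s => pvRep g n (g s)

def pvEncN (s : String) : List Nat := (s.toList.filter (fun c => c.toNat < 128)).map (fun c => c.toNat)

theorem pvRepAdd {α : Type} (g : α → α) (m n : Nat) (s : α) :
    pvRep g (m + n) s = pvRep g n (pvRep g m s) := by
  induction m generalizing s with
  | zero => simp [pvRep]
  | succ m ih => rw [Nat.succ_add]; simp [pvRep, ih]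

theorem pvAndOne (x : Nat) : x &&& 1 = (x.testBit 0).toNat := by
  cases hb : x.testBit 0 <;> simp [Nat.and_one_is_mod] <;> simp [Nat.testBit_zero] at hb <;> omega

theorem pvOrBit (n : Nat) (h : n.testBit 0 = false) (b : Bool) : n ||| b.toNat = n ^^^ b.toNat := by
  cases b
  · simp
  · apply Nat.eq_of_testBit_eq; intro i
    rw [Bool.toNat_true, Nat.testBit_or, Nat.testBit_xor]
    cases i with
    | zero => rw [h]; rfl
    | succ m =>
      have h1 : (1 : Nat).testBit (m + 1) = false := by simp [Nat.testBit_succ]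
      rw [h1]; simp

theorem pvBaseBit0 (s : Nat) : (((s <<< 1) &&& 0xFFFFFFFF)).testBit 0 = false := by
  simp

theorem pvAndPow (h k : Nat) : ((h &&& 2 ^ k) != 0) = h.testBit k := by
  rw [Nat.and_two_pow]
  cases hb : h.testBit k <;> simp

theorem pvParXor (c k a b : Nat) : pvPar c k (a ^^^ b) = Bool.xor (pvPar 0 k a) (pvPar c k b) := by
  have H : ∀ x1 x2 x3 x4 y1 y2 y3 y4 z : Bool,
      Bool.xor (Bool.xor x1 y1) (Bool.xor (Bool.xor x2 y2) (Bool.xor (Bool.xor x3 y3) (Bool.xor (Bool.xor x4 y4) z)))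
      = Bool.xor (Bool.xor x1 (Bool.xor x2 (Bool.xor x3 (Bool.xor x4 false))))
          (Bool.xor y1 (Bool.xor y2 (Bool.xor y3 (Bool.xor y4 z)))) := by decide
  simp only [pvPar, Nat.testBit_xor, Nat.zero_testBit]
  exact H _ _ _ _ _ _ _ _ _

theorem pvBaseXor (a b : Nat) :
    (((a ^^^ b) <<< 1) &&& 0xFFFFFFFF) = ((a <<< 1) &&& 0xFFFFFFFF) ^^^ ((b <<< 1) &&& 0xFFFFFFFF) := by
  apply Nat.eq_of_testBit_eq; intro i
  simp only [Nat.testBit_and, Nat.testBit_shiftLeft, Nat.testBit_xor]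
  cases (decide (1 ≤ i)) <;> cases ((0xFFFFFFFF : Nat).testBit i) <;>
    cases (a.testBit (i - 1)) <;> cases (b.testBit (i - 1)) <;> rfl

theorem pvSteplin (c k a b : Nat) : pvMstep c k (a ^^^ b) = pvMstep 0 k a ^^^ pvMstep c k b := by
  unfold pvMstep
  rw [pvParXor, pvBaseXor]
  cases (pvPar 0 k a) <;> cases (pvPar c k b) <;> simp [Nat.xor_comm, Nat.xor_left_comm]

theorem pvFeedlin (c a b : Nat) : pvFeedN c (a ^^^ b) = pvFeedN 0 a ^^^ pvFeedN c b := by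
  simp only [pvFeedN, pvSteplin]

theorem pvDecomp (h : Nat) (hh : h < 2 ^ 32) :
    h = ((((h >>> 24) &&& 0xFF) <<< 24) ^^^ ((((h >>> 16) &&& 0xFF) <<< 16) ^^^ ((((h >>> 8) &&& 0xFF) <<< 8) ^^^ (h &&& 0xFF)))) := by
  apply Nat.eq_of_testBit_eq; intro i
  have hm : ∀ j : Nat, (0xFF : Nat).testBit j = decide (j < 8) := fun j => Nat.testBit_two_pow_sub_one 8 j
  simp only [Nat.testBit_xor, Nat.testBit_and, Nat.testBit_shiftLeft, Nat.testBit_shiftRight, hm]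
  by_cases h32 : i < 32
  · interval_cases i <;> simp
  · have hz : h.testBit i = false :=
      Nat.testBit_eq_false_of_lt (lt_of_lt_of_le hh (Nat.pow_le_pow_right (by norm_num) (by omega)))
    simp [hz, show ¬ (i - 24 < 8) by omega, show ¬ (i - 16 < 8) by omega, show ¬ (i - 8 < 8) by omega]

theorem pvIfBit (b : Nat) (p : Bool) (hb0 : b.testBit 0 = false) :
    (if p then b ||| 1 else b) = b ^^^ p.toNat := by
  cases p
  · simp
  · exact pvOrBit b hb0 true

theorem pvAstepEq (c k h : Nat) : pvAstep c (2 ^ k) h = pvMstep c k h := by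
  unfold pvAstep pvMstep
  have e31 : ((h &&& 0x80000000) != 0) = h.testBit 31 := pvAndPow h 31
  have e21 : ((h &&& 0x200000) != 0) = h.testBit 21 := pvAndPow h 21
  have e1 : ((h &&& 2) != 0) = h.testBit 1 := pvAndPow h 1
  have e0 : ((h &&& 1) != 0) = h.testBit 0 := pvAndPow h 0
  rw [e31, e21, e1, e0, pvAndPow c k]
  exact pvIfBit _ _ (pvBaseBit0 h)

theorem pvByteAEq (c h : Nat) : pvByteA c h = pvFeedN c h := by
  have A : ∀ (k bc : Nat), bc = 2 ^ k → ∀ s, pvAstep c bc s = pvMstep c k s :=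
    fun k bc e s => e ▸ pvAstepEq c k s
  simp only [pvByteA, pvFeedN, A 0 1 (by norm_num), A 1 2 (by norm_num), A 2 4 (by norm_num),
    A 3 8 (by norm_num), A 4 16 (by norm_num), A 5 32 (by norm_num), A 6 64 (by norm_num),
    A 7 128 (by norm_num)]

-- the table-driven byte transform equals the plain byte transform (heart of the equivalence)
theorem pvByteTable (c h : Nat) (hh : h < 2 ^ 32) :
    pvFeedN c h =
      (((pvFeedN 0 (((h >>> 24) &&& 0xFF) <<< 24) ^^^ pvFeedN 0 (((h >>> 16) &&& 0xFF) <<< 16)) ^^^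
          pvFeedN 0 (((h >>> 8) &&& 0xFF) <<< 8)) ^^^ pvFeedN 0 (h &&& 0xFF)) ^^^ pvFeedN c 0 := by
  conv_lhs => rw [pvDecomp h hh]
  rw [pvFeedlin, pvFeedlin, pvFeedlin]
  have hlast : pvFeedN c (h &&& 0xFF) = pvFeedN 0 (h &&& 0xFF) ^^^ pvFeedN c 0 := by
    have := pvFeedlin c (h &&& 0xFF) 0
    rwa [Nat.xor_zero] at this
  rw [hlast]
  simp [Nat.xor_assoc]

-- ===== Int ↔ Nat bridges =====

theorem pvNatStepEq (s c kk : Nat) :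
    (((s <<< 1) &&& 0xFFFFFFFF) ||| (((((s >>> 31) ^^^ (s >>> 21)) ^^^ (s >>> 1)) ^^^ s ^^^ (c >>> kk)) &&& 1))
      = pvMstep c kk s := by
  rw [pvAndOne]
  have H : ∀ a b c d e : Bool, Bool.xor (Bool.xor (Bool.xor (Bool.xor a b) c) d) e
      = Bool.xor a (Bool.xor b (Bool.xor c (Bool.xor d e))) := by decide
  have hb : (((((s >>> 31) ^^^ (s >>> 21)) ^^^ (s >>> 1)) ^^^ s ^^^ (c >>> kk))).testBit 0 = pvPar c kk s := by
    simp only [Nat.testBit_xor, Nat.testBit_shiftRight, Nat.add_zero, pvPar]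
    exact H _ _ _ _ _
  rw [hb, pvOrBit _ (pvBaseBit0 s)]
  rfl

theorem pvStepB (s c kk : Nat) :
    PySem.Int.bor (PySem.Int.band ((s : Int) <<< (1 : Nat)) 0xFFFFFFFF)
      (PySem.Int.band
        (PySem.Int.bxor (PySem.Int.bxor (PySem.Int.bxor (PySem.Int.bxor
          ((s : Int) >>> (31 : Nat)) ((s : Int) >>> (21 : Nat))) ((s : Int) >>> (1 : Nat))) (s : Int))
        ((c : Int) >>> ((kk : Int)))) 1)
      = ((pvMstep c kk s : Nat) : Int) := by
  rw [show ((s : Int) <<< (1 : Nat)) = ((s <<< 1 : Nat) : Int) from rfl,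
      show ((s : Int) >>> (31 : Nat)) = ((s >>> 31 : Nat) : Int) from rfl,
      show ((s : Int) >>> (21 : Nat)) = ((s >>> 21 : Nat) : Int) from rfl,
      show ((s : Int) >>> (1 : Nat)) = ((s >>> 1 : Nat) : Int) from rfl,
      Int.shiftRight_natCast c kk,
      show (0xFFFFFFFF : Int) = ((0xFFFFFFFF : Nat) : Int) from rfl,
      show (1 : Int) = ((1 : Nat) : Int) from rfl,
      PySem.Int.band_natCast, PySem.Int.bxor_natCast, PySem.Int.bxor_natCast,
      PySem.Int.bxor_natCast, PySem.Int.bxor_natCast, PySem.Int.band_natCast,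
      PySem.Int.bor_natCast, pvNatStepEq]

theorem pvBneCast (m : Nat) : (((m : Nat) : Int) != 0) = (m != 0) := by
  cases m <;> simp <;> omega

theorem pvFoldB (c : Nat) (ks : List Int) : ∀ (s : Nat),
    List.foldl
      (fun (state k : Int) =>
        let fb := PySem.Int.band
          (PySem.Int.bxor (PySem.Int.bxor (PySem.Int.bxor (PySem.Int.bxor
            (state >>> (31 : Nat)) (state >>> (21 : Nat))) (state >>> (1 : Nat))) state)
            ((c : Int) >>> ((k.toNat : Int)))) 1
        PySem.Int.bor (PySem.Int.band (state <<< (1 : Nat)) 0xFFFFFFFF) fb)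
      (s : Int) ks
    = ((List.foldl (fun s (k : Int) => pvMstep c k.toNat s) s ks : Nat) : Int) := by
  induction ks with
  | nil => intro s; rfl
  | cons k ks ih =>
    intro s
    rw [List.foldl_cons, List.foldl_cons]
    have h1 : (let fb := PySem.Int.band (PySem.Int.bxor (PySem.Int.bxor (PySem.Int.bxor (PySem.Int.bxor ((s : Int) >>> (31 : Nat)) ((s : Int) >>> (21 : Nat))) ((s : Int) >>> (1 : Nat))) (s : Int)) ((c : Int) >>> ((k.toNat : Int)))) 1;
        PySem.Int.bor (PySem.Int.band ((s : Int) <<< (1 : Nat)) 0xFFFFFFFF) fb)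
        = ((pvMstep c k.toNat s : Nat) : Int) := pvStepB s c k.toNat
    rw [h1, ih]

theorem pvFeedBridge (s c : Nat) : pvLfsrFeed (s : Int) (c : Int) = ((pvFeedN c s : Nat) : Int) := by
  have hr : PySem.List.pyRange 0 8 1 = [0, 1, 2, 3, 4, 5, 6, 7] := by decide
  rw [pvLfsrFeed, hr, pvFoldB c [0, 1, 2, 3, 4, 5, 6, 7] s]
  rfl

theorem pvTableT (c : Nat) (hc : c < 256) :
    PySem.List.pyGetD pvT (c : Int) 0 = ((pvFeedN c 0 : Nat) : Int) := by
  rw [pvT, show (256 : Int) = ((256 : Nat) : Int) from rfl,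
    PySem.List.pyGetD_map_pyRange (fun b => pvLfsrFeed 0 b) 256 c 0 hc]
  exact pvFeedBridge 0 c

theorem pvTableS0 (c : Nat) (hc : c < 256) :
    PySem.List.pyGetD pvS0 (c : Int) 0 = ((pvFeedN 0 c : Nat) : Int) := by
  rw [pvS0, show (256 : Int) = ((256 : Nat) : Int) from rfl,
    PySem.List.pyGetD_map_pyRange (fun b => pvLfsrFeed b 0) 256 c 0 hc]
  exact pvFeedBridge c 0

theorem pvTableS1 (c : Nat) (hc : c < 256) :
    PySem.List.pyGetD pvS1 (c : Int) 0 = ((pvFeedN 0 (c <<< 8) : Nat) : Int) := by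
  rw [pvS1, show (256 : Int) = ((256 : Nat) : Int) from rfl,
    PySem.List.pyGetD_map_pyRange (fun (b : Int) => pvLfsrFeed (b <<< (8 : Nat)) 0) 256 c 0 hc]
  exact pvFeedBridge (c <<< 8) 0

theorem pvTableS2 (c : Nat) (hc : c < 256) :
    PySem.List.pyGetD pvS2 (c : Int) 0 = ((pvFeedN 0 (c <<< 16) : Nat) : Int) := by
  rw [pvS2, show (256 : Int) = ((256 : Nat) : Int) from rfl,
    PySem.List.pyGetD_map_pyRange (fun (b : Int) => pvLfsrFeed (b <<< (16 : Nat)) 0) 256 c 0 hc]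
  exact pvFeedBridge (c <<< 16) 0

theorem pvTableS3 (c : Nat) (hc : c < 256) :
    PySem.List.pyGetD pvS3 (c : Int) 0 = ((pvFeedN 0 (c <<< 24) : Nat) : Int) := by
  rw [pvS3, show (256 : Int) = ((256 : Nat) : Int) from rfl,
    PySem.List.pyGetD_map_pyRange (fun (b : Int) => pvLfsrFeed (b <<< (24 : Nat)) 0) 256 c 0 hc]
  exact pvFeedBridge (c <<< 24) 0

theorem pvEncodeEq (s : String) : pvEncodeAscii s = (pvEncN s).map (fun (n : Nat) => (n : Int)) := by
  rw [pvEncodeAscii, pvEncN, List.map_map]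
  rfl

theorem pvCharBridge (e : List Nat) (j : Nat) :
    (if (j : Int) < ((e.map (fun (n : Nat) => (n : Int))).length : Int)
      then PySem.List.pyGetD (e.map (fun (n : Nat) => (n : Int))) (j : Int) 0 else 0)
      = ((pvCN e j : Nat) : Int) := by
  rw [PySem.List.pyGetD_natCast]
  by_cases hj : j < e.length
  · rw [if_pos (by simpa using hj), pvCN, if_pos hj,
      List.getD_eq_getElem _ _ (by simpa using hj), List.getD_eq_getElem _ _ hj,
      List.getElem_map]
  · rw [if_neg (by simpa using hj), pvCN, if_neg hj]
    rfl

theorem pvCNlt (e : List Nat) (he : ∀ x ∈ e, x < 128) (j : Nat) : pvCN e j < 256 := by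
  rw [pvCN]
  by_cases hj : j < e.length
  · rw [if_pos hj, List.getD_eq_getElem _ _ hj]
    exact lt_trans (he _ (List.getElem_mem _)) (by norm_num)
  · rw [if_neg hj]; norm_num [Nat.shiftLeft_eq]

theorem pvEncNlt (s : String) : ∀ x ∈ pvEncN s, x < 128 := by
  intro x hx
  rw [pvEncN] at hx
  obtain ⟨c, hc, rfl⟩ := List.mem_map.mp hx
  simpa using (List.of_mem_filter hc)

theorem pvAstepLt (c bc h : Nat) : pvAstep c bc h < 2 ^ 32 := by
  rw [pvAstep]
  have hbase : ((h <<< 1) &&& 0xFFFFFFFF) < 2 ^ 32 :=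
    lt_of_le_of_lt Nat.and_le_right (by norm_num)
  split
  · exact Nat.or_lt_two_pow hbase (by norm_num)
  · exact hbase

theorem pvByteALt (c h : Nat) : pvByteA c h < 2 ^ 32 := pvAstepLt _ _ _

theorem pvFst {A B : Type} (a : A) (b : B) : (a, b).1 = a := rfl
theorem pvSnd {A B : Type} (a : A) (b : B) : (a, b).2 = b := rfl

-- A's hash update commutes with the cast
theorem pvHBridge (e : List Nat) (h j bc : Nat) :
    (if Bool.xor (PySem.Int.band (h : Int) 0x80000000 != 0)
        (Bool.xor (PySem.Int.band (h : Int) 0x200000 != 0)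
          (Bool.xor (PySem.Int.band (h : Int) 2 != 0)
            (Bool.xor (PySem.Int.band (h : Int) 1 != 0)
              (PySem.Int.band ((pvCN e j : Nat) : Int) (bc : Int) != 0)))) then
      PySem.Int.bor (PySem.Int.band ((h : Int) <<< (1 : Nat)) 0xFFFFFFFF) 1
    else PySem.Int.band ((h : Int) <<< (1 : Nat)) 0xFFFFFFFF)
    = ((pvAstep (pvCN e j) bc h : Nat) : Int) := by
  rw [show (0x80000000 : Int) = ((0x80000000 : Nat) : Int) from rfl,
      show (0x200000 : Int) = ((0x200000 : Nat) : Int) from rfl,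
      show (2 : Int) = ((2 : Nat) : Int) from rfl,
      show (1 : Int) = ((1 : Nat) : Int) from rfl,
      show ((h : Int) <<< (1 : Nat)) = ((h <<< 1 : Nat) : Int) from rfl,
      show (0xFFFFFFFF : Int) = ((0xFFFFFFFF : Nat) : Int) from rfl,
      PySem.Int.band_natCast, PySem.Int.band_natCast, PySem.Int.band_natCast,
      PySem.Int.band_natCast, PySem.Int.band_natCast, PySem.Int.band_natCast,
      PySem.Int.bor_natCast,
      pvBneCast, pvBneCast, pvBneCast, pvBneCast, pvBneCast, pvAstep]
  split <;> rfl

-- A's loop over any index list, bridged to the Nat model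
theorem pvFoldA (e : List Nat) (ks : List Int) : ∀ (h j bc : Nat),
    List.foldl
      (fun (st : Int × Int × Int) (_i : Int) =>
        let dwHash := st.1
        let j := st.2.1
        let bCounter := st.2.2
        let D : Bool := PySem.Int.band dwHash 0x80000000 != 0
        let A : Bool := PySem.Int.band dwHash 0x200000 != 0
        let B : Bool := PySem.Int.band dwHash 2 != 0
        let C : Bool := PySem.Int.band dwHash 1 != 0
        let dwHash := PySem.Int.band (dwHash <<< (1 : Nat)) 0xFFFFFFFF
        let current_char : Int :=
          if j < (((e.map (fun (n : Nat) => (n : Int))).length : Nat) : Int)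
            then PySem.List.pyGetD (e.map (fun (n : Nat) => (n : Int))) j 0 else 0
        let X : Bool := PySem.Int.band current_char bCounter != 0
        let dwHash := if Bool.xor D (Bool.xor A (Bool.xor B (Bool.xor C X))) then PySem.Int.bor dwHash 1 else dwHash
        let bCounter := bCounter <<< (1 : Nat)
        if bCounter = 0 ∨ bCounter > 0x80 then (dwHash, j + 1, (1 : Int)) else (dwHash, j, bCounter))
      ((h : Int), (j : Int), (bc : Int)) ks
    = (((pvRep (pvStepT e) ks.length (h, j, bc)).1 : Int),
       ((pvRep (pvStepT e) ks.length (h, j, bc)).2.1 : Int),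
       ((pvRep (pvStepT e) ks.length (h, j, bc)).2.2 : Int)) := by
  induction ks with
  | nil => intro h j bc; rfl
  | cons k ks ih =>
    intro h j bc
    rw [List.foldl_cons, List.length_cons]
    simp only [pvFst, pvSnd]
    rw [show ((bc : Int) <<< (1 : Nat)) = ((bc <<< 1 : Nat) : Int) from rfl]
    have hiff : (((bc <<< 1 : Nat) : Int) = 0 ∨ ((bc <<< 1 : Nat) : Int) > 0x80)
        ↔ (bc <<< 1 = 0 ∨ bc <<< 1 > 0x80) := by
      constructor <;> intro hx <;> rcases hx with hx | hx
      · exact Or.inl (by exact_mod_cast hx)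
      · exact Or.inr (by exact_mod_cast hx)
      · exact Or.inl (by exact_mod_cast hx)
      · exact Or.inr (by exact_mod_cast hx)
    by_cases hcond : (bc <<< 1 = 0 ∨ bc <<< 1 > 0x80)
    · rw [if_pos (hiff.mpr hcond), pvCharBridge e j, pvHBridge e h j bc,
        show ((j : Int) + 1) = ((j + 1 : Nat) : Int) from by push_cast; ring]
      have hrep : pvRep (pvStepT e) (ks.length + 1) (h, j, bc)
          = pvRep (pvStepT e) ks.length (pvAstep (pvCN e j) bc h, j + 1, 1) := by
        rw [show pvRep (pvStepT e) (ks.length + 1) (h, j, bc)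
            = pvRep (pvStepT e) ks.length (pvStepT e (h, j, bc)) from rfl]
        congr 1
        simp only [pvStepT, pvFst, pvSnd]
        rw [if_pos hcond]
      rw [hrep]
      exact ih (pvAstep (pvCN e j) bc h) (j + 1) 1
    · rw [if_neg ((not_congr hiff).mpr hcond), pvCharBridge e j, pvHBridge e h j bc]
      have hrep : pvRep (pvStepT e) (ks.length + 1) (h, j, bc)
          = pvRep (pvStepT e) ks.length (pvAstep (pvCN e j) bc h, j, bc <<< 1) := by
        rw [show pvRep (pvStepT e) (ks.length + 1) (h, j, bc)
            = pvRep (pvStepT e) ks.length (pvStepT e (h, j, bc)) from rfl]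
        congr 1
        simp only [pvStepT, pvFst, pvSnd]
        rw [if_neg hcond]
      rw [hrep]
      exact ih (pvAstep (pvCN e j) bc h) j (bc <<< 1)

-- B's loop step, bridged to the Nat model
theorem pvBStepBridge (e : List Nat) (he : ∀ x ∈ e, x < 128) (h j : Nat) :
    (let byte : Int := if (j : Int) < ((e.map (fun (n : Nat) => (n : Int))).length : Int)
        then PySem.List.pyGetD (e.map (fun (n : Nat) => (n : Int))) (j : Int) 0 else 0
     PySem.Int.bxor (PySem.Int.bxor (PySem.Int.bxor (PySem.Int.bxor
        (PySem.List.pyGetD pvS3 (PySem.Int.band ((h : Int) >>> (24 : Nat)) 0xFF) 0)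
        (PySem.List.pyGetD pvS2 (PySem.Int.band ((h : Int) >>> (16 : Nat)) 0xFF) 0))
        (PySem.List.pyGetD pvS1 (PySem.Int.band ((h : Int) >>> (8 : Nat)) 0xFF) 0))
        (PySem.List.pyGetD pvS0 (PySem.Int.band (h : Int) 0xFF) 0))
        (PySem.List.pyGetD pvT byte 0))
    = ((pvBStepN e h j : Nat) : Int) := by
  have hlt : ∀ x : Nat, x &&& 0xFF < 256 := fun x => lt_of_le_of_lt Nat.and_le_right (by norm_num)
  show PySem.Int.bxor _ _ = _
  rw [pvCharBridge e j,
      show ((h : Int) >>> (24 : Nat)) = ((h >>> 24 : Nat) : Int) from rfl,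
      show ((h : Int) >>> (16 : Nat)) = ((h >>> 16 : Nat) : Int) from rfl,
      show ((h : Int) >>> (8 : Nat)) = ((h >>> 8 : Nat) : Int) from rfl,
      show (0xFF : Int) = ((0xFF : Nat) : Int) from rfl,
      PySem.Int.band_natCast, PySem.Int.band_natCast, PySem.Int.band_natCast,
      PySem.Int.band_natCast,
      pvTableS3 _ (hlt _), pvTableS2 _ (hlt _), pvTableS1 _ (hlt _), pvTableS0 _ (hlt _),
      pvTableT _ (pvCNlt e he j),
      PySem.Int.bxor_natCast, PySem.Int.bxor_natCast, PySem.Int.bxor_natCast,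
      PySem.Int.bxor_natCast]
  rfl

theorem pvFoldBB (e : List Nat) (he : ∀ x ∈ e, x < 128) (l : List Nat) : ∀ (h : Nat),
    List.foldl
      (fun (h j : Int) =>
        let byte : Int := if j < ((e.map (fun (n : Nat) => (n : Int))).length : Int)
            then PySem.List.pyGetD (e.map (fun (n : Nat) => (n : Int))) j 0 else 0
        PySem.Int.bxor (PySem.Int.bxor (PySem.Int.bxor (PySem.Int.bxor
          (PySem.List.pyGetD pvS3 (PySem.Int.band (h >>> (24 : Nat)) 0xFF) 0)
          (PySem.List.pyGetD pvS2 (PySem.Int.band (h >>> (16 : Nat)) 0xFF) 0))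
          (PySem.List.pyGetD pvS1 (PySem.Int.band (h >>> (8 : Nat)) 0xFF) 0))
          (PySem.List.pyGetD pvS0 (PySem.Int.band h 0xFF) 0))
          (PySem.List.pyGetD pvT byte 0))
      (h : Int) (l.map (fun (k : Nat) => (k : Int)))
    = ((List.foldl (fun h j => pvBStepN e h j) h l : Nat) : Int) := by
  induction l with
  | nil => intro h; rfl
  | cons j l ih =>
    intro h
    rw [List.map_cons, List.foldl_cons, List.foldl_cons, pvBStepBridge e he h j, ih]

-- grouping: eight Nat-level A steps consume exactly one character
set_option maxHeartbeats 2000000 in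
theorem pvGroup (e : List Nat) (h j : Nat) :
    pvRep (pvStepT e) 8 (h, j, 1) = (pvByteA (pvCN e j) h, j + 1, 1) := by
  have u : ∀ (n : Nat) (s : Nat × Nat × Nat),
      pvRep (pvStepT e) (n + 1) s = pvRep (pvStepT e) n (pvStepT e s) := fun n s => rfl
  have st : ∀ (bc h : Nat), pvStepT e (h, j, bc)
      = (pvAstep (pvCN e j) bc h, if bc <<< 1 = 0 ∨ bc <<< 1 > 0x80 then j + 1 else j,
          if bc <<< 1 = 0 ∨ bc <<< 1 > 0x80 then 1 else bc <<< 1) := by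
    intro bc h
    simp only [pvStepT, pvFst, pvSnd]
    split <;> rfl
  rw [show (8 : Nat) = 7 + 1 from rfl, u, show (7 : Nat) = 6 + 1 from rfl, u,
      show (6 : Nat) = 5 + 1 from rfl, u, show (5 : Nat) = 4 + 1 from rfl, u,
      show (4 : Nat) = 3 + 1 from rfl, u, show (3 : Nat) = 2 + 1 from rfl, u,
      show (2 : Nat) = 1 + 1 from rfl, u, u]
  rw [st 1]; norm_num [Nat.shiftLeft_eq]
  rw [st 2]; norm_num [Nat.shiftLeft_eq]
  rw [st 4]; norm_num [Nat.shiftLeft_eq]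
  rw [st 8]; norm_num [Nat.shiftLeft_eq]
  rw [st 16]; norm_num [Nat.shiftLeft_eq]
  rw [st 32]; norm_num [Nat.shiftLeft_eq]
  rw [st 64]; norm_num [Nat.shiftLeft_eq]
  rw [st 128]; norm_num [Nat.shiftLeft_eq, pvByteA, pvRep]

theorem pvTotalA (e : List Nat) : ∀ (m h j : Nat),
    pvRep (pvStepT e) (8 * m) (h, j, 1)
      = ((List.range' j m).foldl (fun h jj => pvByteA (pvCN e jj) h) h, j + m, 1) := by
  intro m
  induction m with
  | zero => intro h j; rfl
  | succ m ih =>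
    intro h j
    rw [Nat.mul_succ, pvRepAdd, ih, pvGroup, List.range'_1_concat, List.foldl_append,
      List.foldl_cons, List.foldl_nil]
    refine Prod.ext rfl (Prod.ext ?_ rfl)
    show j + m + 1 = j + (m + 1)
    omega

-- the two Nat-level loops agree (uses the 32-bit bound invariant)
theorem pvNatEq (e : List Nat) : ∀ (l : List Nat) (h : Nat), h < 2 ^ 32 →
    List.foldl (fun h jj => pvByteA (pvCN e jj) h) h l
      = List.foldl (fun h j => pvBStepN e h j) h l := by
  intro l
  induction l with
  | nil => intro h _; rfl
  | cons j l ih =>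
    intro h hh
    rw [List.foldl_cons, List.foldl_cons]
    have hb : pvByteA (pvCN e j) h = pvBStepN e h j := by
      rw [pvByteAEq, pvByteTable (pvCN e j) h hh]; rfl
    rw [← hb]
    exact ih (pvByteA (pvCN e j) h) (pvByteALt _ _)

theorem pvMain (s : String) : ce_hash s = ce_hash_alt s := by
  simp only [ce_hash, ce_hash_alt, pvEncodeEq, PySem.Str.len_eq]
  rw [show ((1 : Int), (0 : Int), (1 : Int))
      = (((1 : Nat) : Int), ((0 : Nat) : Int), ((1 : Nat) : Int)) from rfl,
    pvFoldA (pvEncN s) _ 1 0 1, PySem.List.length_pyRange_one,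
    show ((8 * (s.toList.length : Int) - 0).toNat) = 8 * s.toList.length from by omega,
    pvTotalA (pvEncN s) s.toList.length 1 0]
  rw [PySem.List.pyRange_one]
  have hlist : List.map (fun (k : Nat) => 0 + (k : Int)) (List.range ((s.toList.length : Int) - 0).toNat)
      = List.map (fun (k : Nat) => (k : Int)) (List.range s.toList.length) := by
    simp
  rw [hlist]
  rw [show (1 : Int) = ((1 : Nat) : Int) from rfl,
    pvFoldBB (pvEncN s) (pvEncNlt s) (List.range s.toList.length) 1]
  simp only [pvFst, pvSnd]
  rw [List.range_eq_range', pvNatEq (pvEncN s) (List.range' 0 s.toList.length) 1 (by norm_num)]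

theorem ce_hash_spec : Claim_equal_ce_hash := by
  intro input_string _
  unfold Spec_ce_hash
  exact pvMain input_string
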